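-- pv_equiv track=rewrite | github.com/kvanbiesen/bmw-cardata-ha | custom_components/cardata/coordinator.py | _sanitize_timestamp_string
-- ===== SOURCE A (Python) =====
-- from typing import Any, ClassVar, Dict, Optional
--
-- _MAX_TIMESTAMP_STRING_LENGTH = 64
--
-- def _sanitize_timestamp_string(timestamp: Optional[str]) -> Optional[str]:
--     """Sanitize raw timestamp string for storage.
--
--     - Limits length to prevent memory issues
--     - Validates basic ISO-8601-like format
--     - Returns None for invalid timestamps
--     """
--     if timestamp is None:
--         return None
--     if not isinstance(timestamp, str):
--         return None
--     # Limit length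
--     if len(timestamp) > _MAX_TIMESTAMP_STRING_LENGTH:
--         return None
--     # Basic format validation: should look like ISO-8601 (start with digit, contain reasonable chars)
--     if not timestamp or not timestamp[0].isdigit():
--         return None
--     # Only allow characters valid in ISO-8601 timestamps
--     allowed = set("0123456789-:TZ.+ ")
--     if not all(c in allowed for c in timestamp):
--         return None
--     return timestamp
-- ===== SOURCE B (Python) =====
-- # B: same guards, but the digit-first + allowed-chars scan replaced by one anchored regex fullmatch.
-- import re
--
-- _MAX_TIMESTAMP_STRING_LENGTH = 64
--
-- _TIMESTAMP_RE = re.compile(r'[0-9][0-9:TZ.+ \-]*')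
--
--
-- def _sanitize_timestamp_string(timestamp):
--     if timestamp is None:
--         return None
--     if not isinstance(timestamp, str):
--         return None
--     if len(timestamp) > _MAX_TIMESTAMP_STRING_LENGTH:
--         return None
--     if _TIMESTAMP_RE.fullmatch(timestamp):
--         return timestamp
--     return None
-- ===== Notes on version B (the rewrite author's own statement) =====
-- stated objective: idiomatic
-- what changed: The first-char-digit test and the per-character membership scan over a hand-built allowed set are replaced by a single precompiled anchored regex fullmatch ([0-9][0-9:TZ.+ \-]*).
import Mathlib
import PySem

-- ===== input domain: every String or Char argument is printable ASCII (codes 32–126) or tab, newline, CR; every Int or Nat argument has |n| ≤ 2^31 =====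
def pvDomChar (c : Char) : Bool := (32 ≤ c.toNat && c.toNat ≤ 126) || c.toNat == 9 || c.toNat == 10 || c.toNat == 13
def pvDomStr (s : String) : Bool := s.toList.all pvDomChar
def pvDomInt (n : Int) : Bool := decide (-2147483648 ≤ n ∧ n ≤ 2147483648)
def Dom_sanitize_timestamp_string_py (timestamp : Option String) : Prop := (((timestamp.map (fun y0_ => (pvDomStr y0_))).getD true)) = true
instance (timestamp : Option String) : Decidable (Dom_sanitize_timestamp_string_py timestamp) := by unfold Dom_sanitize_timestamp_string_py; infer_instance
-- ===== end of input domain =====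

-- B replaces A's first-char-digit test and allowed-set scan by one anchored regex fullmatch; same return value everywhere.

-- ===== PORT A =====
def pvAllowed : PySem.Set Char := PySem.Set.ofList "0123456789-:TZ.+ ".toList

def sanitize_timestamp_string_py (timestamp : Option String) : Option String :=
  match timestamp with
  | none => none   -- `if timestamp is None: return None` (the isinstance check is always true under the type convention)
  | some s =>
    if 64 < PySem.Str.len s then none
    else if s.toList.isEmpty || !((PySem.List.pyGet? s.toList 0).elim false PySem.Chars.isdigit) then none
    else if !(s.toList.all (fun c => pvAllowed.contains c)) then none
    else some s

-- ===== PORT B =====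
def pvDigit (c : Char) : Bool := '0' <= c && c <= '9'

def pvClassChar (c : Char) : Bool :=
  pvDigit c || c == ':' || c == 'T' || c == 'Z' || c == '.' || c == '+' || c == ' ' || c == '-'

-- hand port of `_TIMESTAMP_RE.fullmatch`, regex [0-9][0-9:TZ.+ \-]* : exact — the whole string must be
-- one char of [0-9] followed by any number of chars of the class.
def pvFullmatch : List Char -> Bool
  | [] => false
  | c :: rest => pvDigit c && rest.all pvClassChar

def sanitize_timestamp_string_py_alt (timestamp : Option String) : Option String :=
  match timestamp with
  | none => none
  | some s =>
    if 64 < PySem.Str.len s then none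
    else if pvFullmatch s.toList then some s else none

-- ===== PRECONDITION & SPEC =====
def Spec_sanitize_timestamp_string_py (timestamp : Option String) (out : Option String) : Prop := out = sanitize_timestamp_string_py_alt timestamp
instance (timestamp : Option String) (out : Option String) : Decidable (Spec_sanitize_timestamp_string_py timestamp out) := by unfold Spec_sanitize_timestamp_string_py; infer_instance

-- ===== CLAIM (what is proved, stated in full; the proofs are below) =====
def Claim_equal_sanitize_timestamp_string_py : Prop := ∀ (timestamp : Option String), Dom_sanitize_timestamp_string_py timestamp → Spec_sanitize_timestamp_string_py timestamp (sanitize_timestamp_string_py timestamp)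

-- ===== LEMMAS AND PROOFS =====
theorem pv_isdigit_eq (c : Char) : PySem.Chars.isdigit c = pvDigit c := by
  simp [PySem.Chars.isdigit, pvDigit]

set_option maxRecDepth 10000 in
theorem pv_allowed_eq (c : Char) : pvAllowed.contains c = pvClassChar c := by
  have h : pvAllowed = ['0','1','2','3','4','5','6','7','8','9','-',':','T','Z','.','+',' '] := by decide
  rw [h, pvClassChar, pvDigit, Bool.eq_iff_iff]
  simp [List.contains_eq_mem, Char.le_def, Char.ext_iff, UInt32.le_iff_toNat_le, UInt32.ext_iff]
  omega

theorem pv_digit_class (c : Char) (h : pvDigit c = true) : pvClassChar c = true := by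
  simp [pvClassChar, h]

-- ===== VERDICT (by name: the statement is the Claim_ definition above) =====
theorem sanitize_timestamp_string_py_spec : Claim_equal_sanitize_timestamp_string_py := by
  intro timestamp _
  unfold Spec_sanitize_timestamp_string_py sanitize_timestamp_string_py sanitize_timestamp_string_py_alt
  cases timestamp with
  | none => rfl
  | some s =>
    dsimp only
    by_cases hlen : 64 < PySem.Str.len s
    · rw [if_pos hlen, if_pos hlen]
    · rw [if_neg hlen, if_neg hlen]
      cases hcs : s.toList with
      | nil => simp [pvFullmatch]
      | cons c rest =>
        have hget : (PySem.List.pyGet? (c :: rest) 0) = some c := by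
          simp [PySem.List.pyGet?, PySem.List.pyIdx?]
        rw [hget]
        simp only [List.isEmpty_cons, Bool.false_or, Option.elim, pv_isdigit_eq, pvFullmatch]
        by_cases hd : pvDigit c = true
        · have h1 : (c :: rest).all (fun x => pvAllowed.contains x) = rest.all pvClassChar := by
            simp only [List.all_cons, pv_allowed_eq, pv_digit_class c hd, Bool.true_and]
          rw [h1]
          by_cases h2 : rest.all pvClassChar = true <;> simp [hd, h2]
        · simp [hd]
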